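-- pv_equiv track=rewrite | github.com/tori29umai0123/T5Gemma-TTS | examples/data_preprocess/prepare_emilia_en.py | repetition_found
-- ===== SOURCE A (Python) =====
-- def repetition_found(text: str, length: int = 4, tolerance: int = 10) -> bool:
--     """Detect over-repetition of short patterns."""
--     from collections import defaultdict
--
--     if length <= 0:
--         return False
--     counts = defaultdict(int)
--     for i in range(max(0, len(text) - length + 1)):
--         counts[text[i : i + length]] += 1
--     return any(cnt > tolerance for cnt in counts.values())
-- ===== SOURCE B (Python) =====
-- def repetition_found(text: str, length: int = 4, tolerance: int = 10) -> bool: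
--     """Detect over-repetition of short patterns (sort + longest-run scan)."""
--     if length <= 0:
--         return False
--     subs = sorted(text[i:i + length] for i in range(max(0, len(text) - length + 1)))
--     prev = None
--     run = 0
--     for s in subs:
--         run = run + 1 if prev == s else 1
--         prev = s
--         if run > tolerance:
--             return True
--     return False
-- ===== Notes on version B (the rewrite author's own statement) =====
-- stated objective: alternative
-- what changed: B replaces A's defaultdict counting pass plus a scan over the counter's values by sorting the list of substrings and scanning it once for a run of more than `tolerance` identical consecutive substrings, with early exit.
import Mathlib
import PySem

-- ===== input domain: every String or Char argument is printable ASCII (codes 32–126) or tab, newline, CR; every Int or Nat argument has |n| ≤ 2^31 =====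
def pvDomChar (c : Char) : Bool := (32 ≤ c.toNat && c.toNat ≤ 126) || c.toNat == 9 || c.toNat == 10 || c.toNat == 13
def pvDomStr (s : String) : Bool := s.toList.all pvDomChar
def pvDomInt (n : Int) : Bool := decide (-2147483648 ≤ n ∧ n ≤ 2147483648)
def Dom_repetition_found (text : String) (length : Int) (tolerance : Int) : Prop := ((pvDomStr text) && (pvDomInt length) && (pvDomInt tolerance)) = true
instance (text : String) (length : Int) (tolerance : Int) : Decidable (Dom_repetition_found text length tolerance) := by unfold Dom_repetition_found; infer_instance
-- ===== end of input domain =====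

-- B differs from A only in algorithm (sort + run scan instead of dict counting); return values agree everywhere.

-- ===== PORT A =====
-- literal port of A: defaultdict counting loop over all length-`length` substrings, then any(cnt > tolerance).
def repetition_found (text : String) (length : Int) (tolerance : Int) : Bool :=
  if length ≤ 0 then false
  else
    let counts := (PySem.List.pyRange 0 (max 0 (PySem.Str.len text - length + 1)) 1).foldl
      (fun d i => d.modify (PySem.Str.slice text (some i) (some (i + length))) 0 (· + 1))
      (PySem.Dict.empty : PySem.Dict String Int)
    counts.values.any (fun cnt => cnt > tolerance)

-- ===== PORT B =====
-- B's loop: walk the sorted substring list keeping (prev, run), return true as soon as run > tolerance.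
def pvRunScan (tol : Int) : List String → Option String → Int → Bool
  | [], _, _ => false
  | s :: rest, prev, run =>
    let run' := if prev = some s then run + 1 else 1
    if run' > tol then true else pvRunScan tol rest (some s) run'

def repetition_found_alt (text : String) (length : Int) (tolerance : Int) : Bool :=
  if length ≤ 0 then false
  else
    let subs := PySem.List.sorted
      ((PySem.List.pyRange 0 (max 0 (PySem.Str.len text - length + 1)) 1).map
        (fun i => PySem.Str.slice text (some i) (some (i + length)))) (fun x => x) false
    pvRunScan tolerance subs none 0

-- ===== PRECONDITION & SPEC =====
def Spec_repetition_found (text : String) (length : Int) (tolerance : Int) (out : Bool) : Prop := out = repetition_found_alt text length tolerance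
instance (text : String) (length : Int) (tolerance : Int) (out : Bool) : Decidable (Spec_repetition_found text length tolerance out) := by unfold Spec_repetition_found; infer_instance

-- ===== CLAIM (what is proved, stated in full; the proofs are below) =====
def Claim_equal_repetition_found : Prop := ∀ (text : String) (length : Int) (tolerance : Int), Dom_repetition_found text length tolerance → Spec_repetition_found text length tolerance (repetition_found text length tolerance)

-- ===== LEMMAS AND PROOFS =====

-- A's value is "some substring occurs more than `tolerance` times".
theorem pv_A_eq (text : String) (length tolerance : Int) (h : ¬ length ≤ 0) :
    repetition_found text length tolerance =
      decide (∃ t ∈ (PySem.List.pyRange 0 (max 0 (PySem.Str.len text - length + 1)) 1).map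
          (fun i => PySem.Str.slice text (some i) (some (i + length))),
        ((((PySem.List.pyRange 0 (max 0 (PySem.Str.len text - length + 1)) 1).map
          (fun i => PySem.Str.slice text (some i) (some (i + length)))).count t : Int) > tolerance)) := by
  set L := (PySem.List.pyRange 0 (max 0 (PySem.Str.len text - length + 1)) 1).map
      (fun i => PySem.Str.slice text (some i) (some (i + length))) with hL
  unfold repetition_found
  rw [if_neg h]
  have hfold : (PySem.List.pyRange 0 (max 0 (PySem.Str.len text - length + 1)) 1).foldl
      (fun d i => d.modify (PySem.Str.slice text (some i) (some (i + length))) 0 (· + 1))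
      (PySem.Dict.empty : PySem.Dict String Int)
      = PySem.Dict.counter L := by
    rw [hL, PySem.Dict.counter_eq_foldl, List.foldl_map]
  simp only [hfold]
  rw [PySem.Dict.values_eq_map_keys _ (PySem.Dict.nodup_keys_counter L) 0,
      PySem.Dict.keys_counter, List.any_map]
  rw [Bool.eq_iff_iff, List.any_eq_true, decide_eq_true_iff]
  simp only [Function.comp, PySem.Dict.getD_counter, decide_eq_true_iff]
  constructor
  · rintro ⟨t, ht, hgt⟩
    exact ⟨t, (PySem.Set.mem_ofList L t).1 ht, hgt⟩
  · rintro ⟨t, ht, hgt⟩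
    exact ⟨t, (PySem.Set.mem_ofList L t).2 ht, hgt⟩

-- every run-length fact below reduces counting in (x :: rest) to counting in rest
theorem pv_count_cons_ne (t x : String) (rest : List String) (h : t ≠ x) :
    List.count t (x :: rest) = List.count t rest := by
  simp [Ne.symm h]

-- run-length scan on a sorted tail: prev = some s, s minimal, run ≤ tol so far.
theorem pv_scan_some (tol : Int) (M : List String) :
    ∀ (s : String) (run : Int), M.Pairwise (· ≤ ·) → (∀ t ∈ M, s ≤ t) → run ≤ tol →
    pvRunScan tol M (some s) run =
      decide ((run + (M.count s : Int) > tol) ∨ ∃ t ∈ M, t ≠ s ∧ ((M.count t : Int) > tol)) := by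
  induction M with
  | nil =>
    intro s run _ _ hrun
    simp [pvRunScan]
    omega
  | cons x rest ih =>
    intro s run hpw hmin hrun
    rw [List.pairwise_cons] at hpw
    by_cases hxs : x = s
    · subst hxs
      have h1 : pvRunScan tol (x :: rest) (some x) run =
          if run + 1 > tol then true else pvRunScan tol rest (some x) (run + 1) := by
        simp [pvRunScan]
      rw [h1]
      have hc : (List.count x (x :: rest) : Int) = (List.count x rest : Int) + 1 := by
        rw [List.count_cons_self]; push_cast; ring
      have hge : (0 : Int) ≤ (List.count x rest : Int) := by positivity
      by_cases hgt : run + 1 > tol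
      · rw [if_pos hgt, eq_comm, decide_eq_true_eq]
        exact Or.inl (by omega)
      · rw [if_neg hgt, ih x (run + 1) hpw.2 hpw.1 (by omega), Bool.eq_iff_iff,
            decide_eq_true_iff, decide_eq_true_iff]
        constructor
        · rintro (h1 | ⟨t, ht, hne, hct⟩)
          · left; omega
          · refine Or.inr ⟨t, List.mem_cons_of_mem _ ht, hne, ?_⟩
            rw [pv_count_cons_ne t x rest hne]; exact hct
        · rintro (h1 | ⟨t, ht, hne, hct⟩)
          · left; omega
          · rcases List.mem_cons.1 ht with h | h
            · exact absurd h hne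
            · exact Or.inr ⟨t, h, hne, by rwa [pv_count_cons_ne t x rest hne] at hct⟩
    · -- new group starts at x; s < x ≤ every element, so s does not occur in x :: rest
      have hsx : s < x := lt_of_le_of_ne (hmin x List.mem_cons_self) (fun h => hxs h.symm)
      have hsnotin : s ∉ x :: rest := by
        intro hmem
        rcases List.mem_cons.1 hmem with h | h
        · exact hxs h.symm
        · exact absurd (hpw.1 s h) (not_le.2 hsx)
      have hcount0 : (List.count s (x :: rest) : Int) = 0 := by
        rw [List.count_eq_zero.2 hsnotin]; rfl
      have hsx' : s ≠ x := ne_of_lt hsx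
      have h1 : pvRunScan tol (x :: rest) (some s) run =
          if (1 : Int) > tol then true else pvRunScan tol rest (some x) 1 := by
        simp [pvRunScan, hsx']
      rw [h1]
      have hcx : (List.count x (x :: rest) : Int) = (List.count x rest : Int) + 1 := by
        rw [List.count_cons_self]; push_cast; ring
      have hge : (0 : Int) ≤ (List.count x rest : Int) := by positivity
      by_cases hgt : (1 : Int) > tol
      · rw [if_pos hgt, eq_comm, decide_eq_true_eq]
        exact Or.inr ⟨x, List.mem_cons_self, fun h => hxs h, by omega⟩
      · rw [if_neg hgt, ih x 1 hpw.2 hpw.1 (by omega), Bool.eq_iff_iff,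
            decide_eq_true_iff, decide_eq_true_iff]
        constructor
        · rintro (h1 | ⟨t, ht, hne, hct⟩)
          · exact Or.inr ⟨x, List.mem_cons_self, fun h => hxs h, by omega⟩
          · refine Or.inr ⟨t, List.mem_cons_of_mem _ ht, ?_, ?_⟩
            · intro hts; exact hsnotin (hts ▸ List.mem_cons_of_mem _ ht)
            · rw [pv_count_cons_ne t x rest hne]; exact hct
        · rintro (h1 | ⟨t, ht, _, hct⟩)
          · omega
          · rcases List.mem_cons.1 ht with h | h
            · subst h; left; omega
            · by_cases htx : t = x
              · subst htx; left; omega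
              · exact Or.inr ⟨t, h, htx, by rwa [pv_count_cons_ne t x rest htx] at hct⟩

-- run-length scan from the initial (None, 0) state on a sorted list.
theorem pv_scan_top (tol : Int) (M : List String) (hpw : M.Pairwise (· ≤ ·)) :
    pvRunScan tol M none 0 = decide (∃ t ∈ M, ((M.count t : Int) > tol)) := by
  cases M with
  | nil => simp [pvRunScan]
  | cons x rest =>
    rw [List.pairwise_cons] at hpw
    have h1 : pvRunScan tol (x :: rest) none 0 =
        if (1 : Int) > tol then true else pvRunScan tol rest (some x) 1 := by
      simp [pvRunScan]
    rw [h1]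
    have hcx : (List.count x (x :: rest) : Int) = (List.count x rest : Int) + 1 := by
      rw [List.count_cons_self]; push_cast; ring
    have hge : (0 : Int) ≤ (List.count x rest : Int) := by positivity
    by_cases hgt : (1 : Int) > tol
    · rw [if_pos hgt, eq_comm, decide_eq_true_eq]
      exact ⟨x, List.mem_cons_self, by omega⟩
    · rw [if_neg hgt, pv_scan_some tol rest x 1 hpw.2 hpw.1 (by omega), Bool.eq_iff_iff,
          decide_eq_true_iff, decide_eq_true_iff]
      constructor
      · rintro (h1 | ⟨t, ht, hne, hct⟩)
        · exact ⟨x, List.mem_cons_self, by omega⟩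
        · exact ⟨t, List.mem_cons_of_mem _ ht, by rwa [pv_count_cons_ne t x rest hne]⟩
      · rintro ⟨t, ht, hct⟩
        rcases List.mem_cons.1 ht with h | h
        · subst h; left; omega
        · by_cases htx : t = x
          · subst htx; left; omega
          · exact Or.inr ⟨t, h, htx, by rwa [pv_count_cons_ne t x rest htx] at hct⟩

-- B's value is the same predicate, transported along sortedness.
theorem pv_B_eq (text : String) (length tolerance : Int) (h : ¬ length ≤ 0) :
    repetition_found_alt text length tolerance =
      decide (∃ t ∈ (PySem.List.pyRange 0 (max 0 (PySem.Str.len text - length + 1)) 1).map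
          (fun i => PySem.Str.slice text (some i) (some (i + length))),
        ((((PySem.List.pyRange 0 (max 0 (PySem.Str.len text - length + 1)) 1).map
          (fun i => PySem.Str.slice text (some i) (some (i + length)))).count t : Int) > tolerance)) := by
  set L := (PySem.List.pyRange 0 (max 0 (PySem.Str.len text - length + 1)) 1).map
      (fun i => PySem.Str.slice text (some i) (some (i + length))) with hL
  unfold repetition_found_alt
  rw [if_neg h]
  have hperm : (PySem.List.sorted L (fun x => x) false).Perm L := PySem.List.sorted_perm L _ _
  have hpw : (PySem.List.sorted L (fun x => x) false).Pairwise (· ≤ ·) :=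
    PySem.List.sorted_pairwise L (fun x => x)
  rw [pv_scan_top tolerance _ hpw]
  rw [Bool.eq_iff_iff, decide_eq_true_iff, decide_eq_true_iff]
  constructor
  · rintro ⟨t, ht, hct⟩
    exact ⟨t, hperm.mem_iff.1 ht, by rwa [hperm.count_eq] at hct⟩
  · rintro ⟨t, ht, hct⟩
    exact ⟨t, hperm.mem_iff.2 ht, by rwa [hperm.count_eq]⟩

-- ===== VERDICT (by name: the statement is the Claim_ definition above) =====
theorem repetition_found_spec : Claim_equal_repetition_found := by
  intro text length tolerance _
  unfold Spec_repetition_found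
  by_cases h : length ≤ 0
  · unfold repetition_found repetition_found_alt
    rw [if_pos h, if_pos h]
  · rw [pv_A_eq text length tolerance h, pv_B_eq text length tolerance h]
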